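-- pv_equiv track=rewrite | github.com/jakhon37/cocojson_tools_merge | draft/create_box/draw_poly_bbox_fromsegvalues.py | sort_poly_value
-- ===== SOURCE A (Python) =====
-- def sort_poly_value(seg_list_p):  # function - get the segmentation values from cocojson file and plot it on image
--     x_seg_coords, y_seg_coords = [], []  # store x and v values of seg list in different lists
--     for i in range(0, len(seg_list_p), 2):  # iterate seg list values and choose first value and skip second
--         x_seg_coords.append(seg_list_p[i])  # append the extracted odd values to the list
--     for i in range(1, len(seg_list_p), 2):  # iterate seg list values and choose second value and skip third
--         y_seg_coords.append(seg_list_p[i])  # append the extracted even values to the list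
--     zipped = zip(x_seg_coords, y_seg_coords)  # zip the two files together
--     poly_list_for_cv2 = [list(ele) for ele in zipped]  # iterate zipped list  and make a list for cv2 poligon
--     return poly_list_for_cv2  # return list
-- ===== SOURCE B (Python) =====
-- def sort_poly_value(seg_list_p):
--     # One pass over paired indices; the bound len-1 reproduces zip's truncation on odd lengths.
--     return [[seg_list_p[i], seg_list_p[i + 1]] for i in range(0, len(seg_list_p) - 1, 2)]
-- ===== Notes on version B (the rewrite author's own statement) =====
-- stated objective: simpler
-- what changed: Replaces the two index-striding collection loops plus zip with a single comprehension over paired indices emitting each [x,y] pair directly.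
import Mathlib
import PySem

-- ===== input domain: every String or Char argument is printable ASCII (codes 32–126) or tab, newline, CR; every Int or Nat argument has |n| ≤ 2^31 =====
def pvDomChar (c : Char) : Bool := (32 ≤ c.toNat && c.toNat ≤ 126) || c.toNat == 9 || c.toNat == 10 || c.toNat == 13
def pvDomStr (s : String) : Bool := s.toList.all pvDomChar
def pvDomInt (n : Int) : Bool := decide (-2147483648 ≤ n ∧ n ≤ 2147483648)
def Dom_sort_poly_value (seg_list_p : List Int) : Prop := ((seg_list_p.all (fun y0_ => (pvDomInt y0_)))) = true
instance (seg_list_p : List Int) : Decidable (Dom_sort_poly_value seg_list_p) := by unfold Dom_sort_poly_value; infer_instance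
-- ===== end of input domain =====

-- B replaces the two striding collection loops + zip with one comprehension over paired indices (objective: simpler).

-- ===== PORT A =====
def sort_poly_value (seg_list_p : List Int) : List (List Int) :=
  let x_seg_coords : List Int := []
  let y_seg_coords : List Int := []
  let x_seg_coords :=
    (PySem.List.pyRange 0 (seg_list_p.length : Int) 2).foldl
      (fun acc i => acc ++ [PySem.List.pyGetD seg_list_p i 0]) x_seg_coords
  let y_seg_coords :=
    (PySem.List.pyRange 1 (seg_list_p.length : Int) 2).foldl
      (fun acc i => acc ++ [PySem.List.pyGetD seg_list_p i 0]) y_seg_coords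
  let zipped := x_seg_coords.zip y_seg_coords
  zipped.map (fun ele => [ele.1, ele.2])

-- ===== PORT B =====
def sort_poly_value_alt (seg_list_p : List Int) : List (List Int) :=
  (PySem.List.pyRange 0 ((seg_list_p.length : Int) - 1) 2).map
    (fun i => [PySem.List.pyGetD seg_list_p i 0, PySem.List.pyGetD seg_list_p (i + 1) 0])

-- ===== PRECONDITION & SPEC =====
def Spec_sort_poly_value (seg_list_p : List Int) (out : List (List Int)) : Prop := out = sort_poly_value_alt seg_list_p
instance (seg_list_p : List Int) (out : List (List Int)) : Decidable (Spec_sort_poly_value seg_list_p out) := by unfold Spec_sort_poly_value; infer_instance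

-- ===== CLAIM (what is proved, stated in full; the proofs are below) =====
def Claim_equal_sort_poly_value : Prop := ∀ (seg_list_p : List Int), Dom_sort_poly_value seg_list_p → Spec_sort_poly_value seg_list_p (sort_poly_value seg_list_p)

-- ===== LEMMAS AND PROOFS =====

theorem sort_poly_value_eq (seg : List Int) :
    sort_poly_value seg = sort_poly_value_alt seg := by
  unfold sort_poly_value sort_poly_value_alt
  simp only [PySem.List.foldl_append_eq_flatMap, List.nil_append, ← List.map_eq_flatMap]
  rw [PySem.List.pyRange_of_pos 0 ((seg.length : Int)) (by norm_num),
      PySem.List.pyRange_of_pos 1 ((seg.length : Int)) (by norm_num),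
      PySem.List.pyRange_of_pos 0 ((seg.length : Int) - 1) (by norm_num)]
  simp only [List.map_map]
  apply List.ext_getElem
  · simp only [List.length_map, List.length_zip, List.length_range]
    split_ifs <;> omega
  · intro k h1 h2
    simp only [List.getElem_map, List.getElem_zip, List.getElem_range, Function.comp]
    ring_nf

-- ===== VERDICT (by name: the statement is the Claim_ definition above) =====
theorem sort_poly_value_spec : Claim_equal_sort_poly_value := by
  intro seg _
  unfold Spec_sort_poly_value
  exact sort_poly_value_eq seg
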